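-- pv_equiv track=rewrite | github.com/matindra/Placement-Assignments_Matindra-Malik | Python/1.Answer_1.py | highest_frequency
-- ===== SOURCE A (Python) =====
-- def highest_frequency(input_string):
--     words = input_string.split()
--
--     word_counts = {}
--     for word in words:
--         word_counts[word] = word_counts.get(word, 0) + 1
--
--     max_frequency = 0
--     for count in word_counts.values():
--         if count > max_frequency:
--             max_frequency = count
--
--     highest_frequency_word_length = 0
--     for word, count in word_counts.items():
--         if count == max_frequency and len(word) > highest_frequency_word_length:
--             highest_frequency_word_length = len(word)
--
--     return highest_frequency_word_length
-- ===== SOURCE B (Python) =====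
-- def highest_frequency(input_string):
--     words = sorted(input_string.split())
--     best_count = 0
--     best_len = 0
--     prev = None
--     run = 0
--     for w in words:
--         if prev == w:
--             run += 1
--         else:
--             prev = w
--             run = 1
--         if run > best_count or (run == best_count and len(w) > best_len):
--             best_count = run
--             best_len = len(w)
--     return best_len
-- ===== Notes on version B (the rewrite author's own statement) =====
-- stated objective: alternative
-- what changed: Replaces the hash-map counting plus two reduction loops by a dictionary-free sort-then-scan: sort the words, then one streaming pass over runs of equal adjacent words keeping the lexicographically best (run length, word length) pair.
import Mathlib
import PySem

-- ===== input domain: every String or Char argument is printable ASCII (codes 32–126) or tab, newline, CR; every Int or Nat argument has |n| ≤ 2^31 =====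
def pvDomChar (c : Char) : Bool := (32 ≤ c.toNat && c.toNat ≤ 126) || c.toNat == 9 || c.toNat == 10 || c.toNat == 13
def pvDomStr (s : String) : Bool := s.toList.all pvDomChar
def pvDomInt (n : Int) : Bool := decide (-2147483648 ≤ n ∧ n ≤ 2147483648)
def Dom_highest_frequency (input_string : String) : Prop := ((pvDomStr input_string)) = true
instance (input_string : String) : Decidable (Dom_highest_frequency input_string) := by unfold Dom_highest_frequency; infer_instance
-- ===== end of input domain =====

-- B replaces A's hash-map counting plus two reduction loops by a dictionary-free sort-then-scan:
-- sort the words, then one streaming pass over runs of equal adjacent words keeping the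
-- lexicographically best (run length, word length) pair; alternative decomposition, not faster.

-- ===== PORT A =====
def highest_frequency (input_string : String) : Int :=
  let words := PySem.Str.split₀ input_string
  let word_counts := words.foldl (fun d w => d.insert w (d.getD w 0 + 1)) PySem.Dict.empty
  let max_frequency := word_counts.values.foldl (fun m c => if c > m then c else m) 0
  word_counts.items.foldl
    (fun acc (wc : String × Int) =>
      if wc.2 = max_frequency ∧ acc < PySem.Str.len wc.1 then PySem.Str.len wc.1 else acc) 0

-- ===== PORT B =====
def highest_frequency_alt (input_string : String) : Int :=
  let words := PySem.List.sorted (PySem.Str.split₀ input_string) (fun w => w) false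
  let st := words.foldl
    (fun (s : Option String × Int × Int × Int) (w : String) =>
      match (if s.1 = some w then (s.1, s.2.1 + 1) else (some w, (1 : Int))) with
      | (prev, run) =>
        if run > s.2.2.1 ∨ (run = s.2.2.1 ∧ PySem.Str.len w > s.2.2.2)
        then (prev, run, run, PySem.Str.len w)
        else (prev, run, s.2.2.1, s.2.2.2))
    (none, 0, 0, 0)
  st.2.2.2

-- ===== PRECONDITION & SPEC =====
def Spec_highest_frequency (input_string : String) (out : Int) : Prop := out = highest_frequency_alt input_string
instance (input_string : String) (out : Int) : Decidable (Spec_highest_frequency input_string out) := by unfold Spec_highest_frequency; infer_instance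

-- ===== CLAIM (what is proved, stated in full; the proofs are below) =====
def Claim_equal_highest_frequency : Prop := ∀ (input_string : String), Dom_highest_frequency input_string → Spec_highest_frequency input_string (highest_frequency input_string)

-- ===== LEMMAS AND PROOFS =====

-- the running selection performed by a max with composite key (k1, k2)
def pvSel {α : Type} (k1 k2 : α → Int) (m x : α) : α :=
  if (decide (k1 m < k1 x) || !decide (k1 x < k1 m) && decide (k2 m < k2 x)) = true then x else m

-- lexicographic ≤ on the composite key
def pvLexLE {α : Type} (k1 k2 : α → Int) (a b : α) : Prop :=
  k1 a < k1 b ∨ (k1 a = k1 b ∧ k2 a ≤ k2 b)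

-- the (count, length) key of a dict item, and the lex-max accumulator of B's streaming pass
def pvKey (p : String × Int) : Int × Int := (p.2, PySem.Str.len p.1)

def pvLmax (b q : Int × Int) : Int × Int :=
  if q.1 > b.1 ∨ (q.1 = b.1 ∧ q.2 > b.2) then q else b

def pvPLE (a b : Int × Int) : Prop := pvLexLE Prod.fst Prod.snd a b

-- B's loop body, named for the proofs (definitionally the lambda of the port)
def pvBstep (s : Option String × Int × Int × Int) (w : String) : Option String × Int × Int × Int :=
  match (if s.1 = some w then (s.1, s.2.1 + 1) else (some w, (1 : Int))) with
  | (prev, run) =>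
    if run > s.2.2.1 ∨ (run = s.2.2.1 ∧ PySem.Str.len w > s.2.2.2)
    then (prev, run, run, PySem.Str.len w)
    else (prev, run, s.2.2.1, s.2.2.2)

theorem pv_sel_cases {α : Type} (k1 k2 : α → Int) (m x : α) :
    pvSel k1 k2 m x = m ∨ pvSel k1 k2 m x = x := by
  rw [pvSel]; split
  · exact Or.inr rfl
  · exact Or.inl rfl

theorem pv_le_sel_left {α : Type} (k1 k2 : α → Int) (m x : α) :
    pvLexLE k1 k2 m (pvSel k1 k2 m x) := by
  rw [pvSel]; split <;> rename_i h <;>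
    simp only [Bool.or_eq_true, Bool.and_eq_true, Bool.not_eq_true', decide_eq_true_eq,
      decide_eq_false_iff_not] at h <;> unfold pvLexLE <;> omega

theorem pv_le_sel_right {α : Type} (k1 k2 : α → Int) (m x : α) :
    pvLexLE k1 k2 x (pvSel k1 k2 m x) := by
  rw [pvSel]; split <;> rename_i h <;>
    simp only [Bool.or_eq_true, Bool.and_eq_true, Bool.not_eq_true', decide_eq_true_eq,
      decide_eq_false_iff_not] at h <;> unfold pvLexLE <;> omega

theorem pv_lex_trans {α : Type} (k1 k2 : α → Int) (a b c : α)
    (h1 : pvLexLE k1 k2 a b) (h2 : pvLexLE k1 k2 b c) : pvLexLE k1 k2 a c := by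
  unfold pvLexLE at *; omega

theorem pv_foldl_sel_mem {α : Type} (k1 k2 : α → Int) :
    ∀ (l : List α) (m0 : α), l.foldl (pvSel k1 k2) m0 = m0 ∨ l.foldl (pvSel k1 k2) m0 ∈ l := by
  intro l
  induction l with
  | nil => intro m0; exact Or.inl rfl
  | cons x t ih =>
    intro m0
    rw [List.foldl_cons]
    rcases ih (pvSel k1 k2 m0 x) with h | h
    · rcases pv_sel_cases k1 k2 m0 x with h2 | h2
      · exact Or.inl (h.trans h2)
      · exact Or.inr (by rw [h, h2]; exact List.mem_cons_self)
    · exact Or.inr (List.mem_cons_of_mem _ h)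

theorem pv_foldl_sel_max {α : Type} (k1 k2 : α → Int) :
    ∀ (l : List α) (m0 : α), pvLexLE k1 k2 m0 (l.foldl (pvSel k1 k2) m0) ∧
      ∀ y ∈ l, pvLexLE k1 k2 y (l.foldl (pvSel k1 k2) m0) := by
  intro l
  induction l with
  | nil => intro m0; exact ⟨Or.inr ⟨rfl, le_refl _⟩, by simp⟩
  | cons x t ih =>
    intro m0
    rw [List.foldl_cons]
    obtain ⟨h1, h2⟩ := ih (pvSel k1 k2 m0 x)
    refine ⟨pv_lex_trans k1 k2 _ _ _ (pv_le_sel_left k1 k2 m0 x) h1, ?_⟩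
    intro y hy
    rcases List.mem_cons.mp hy with rfl | hy
    · exact pv_lex_trans k1 k2 _ _ _ (pv_le_sel_right k1 k2 m0 y) h1
    · exact h2 y hy

theorem pv_len_nonneg (w : String) : 0 ≤ PySem.Str.len w := by
  simp [PySem.Str.len]

-- A's two reduction loops compute the length of the first (count, length)-lex-maximal pair.
theorem pv_core (x : String × Int) (t : List (String × Int))
    (hpos : ∀ p ∈ x :: t, 0 < p.2) :
    ((x :: t).foldl
      (fun acc wc =>
        if wc.2 = ((x :: t).map Prod.snd).foldl (fun m c => if c > m then c else m) 0 ∧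
            acc < PySem.Str.len wc.1
        then PySem.Str.len wc.1 else acc) 0)
    = PySem.Str.len (t.foldl (pvSel (fun kv => kv.2) (fun kv => PySem.Str.len kv.1)) x).1 := by
  set l := x :: t with hl
  set k1 : String × Int → Int := fun kv => kv.2 with hk1
  set k2 : String × Int → Int := fun kv => PySem.Str.len kv.1 with hk2
  set m := t.foldl (pvSel k1 k2) x with hm
  set mf := (l.map Prod.snd).foldl (fun m c => if c > m then c else m) 0 with hmf
  have hmaxfold : mf = (l.map Prod.snd).foldl max 0 := by
    rw [hmf]
    apply PySem.List.foldl_congr_mem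
    intro acc c _
    simp only [max_def]; split_ifs <;> omega
  have hmmem : m ∈ l := by
    rcases pv_foldl_sel_mem k1 k2 t x with h | h
    · rw [hm, h]; exact List.mem_cons_self
    · exact List.mem_cons_of_mem _ h
  have hall : ∀ y ∈ l, pvLexLE k1 k2 y m := by
    obtain ⟨h1, h2⟩ := pv_foldl_sel_max k1 k2 t x
    intro y hy
    rcases List.mem_cons.mp hy with rfl | hy
    · exact h1
    · exact h2 y hy
  have hub : ∀ c ∈ l.map Prod.snd, c ≤ mf := by
    rw [hmaxfold]; exact (PySem.List.le_foldl_max _ _).2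
  have hm2le : m.2 ≤ mf := hub m.2 (List.mem_map_of_mem hmmem)
  have hm2pos : 0 < m.2 := hpos m hmmem
  have hattain : mf ∈ l.map Prod.snd := by
    rcases PySem.List.foldl_max_mem (l.map Prod.snd) 0 with h | h
    · rw [hmaxfold] at *; omega
    · rwa [hmaxfold]
  have hm2 : m.2 = mf := by
    obtain ⟨q, hq, hq2⟩ := List.mem_map.mp hattain
    have := hall q hq
    unfold pvLexLE at this
    simp only [hk1] at this
    omega
  have hstep : ∀ (acc : Int), ∀ wc ∈ l,
      (if wc.2 = mf ∧ acc < PySem.Str.len wc.1 then PySem.Str.len wc.1 else acc)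
      = (if wc.2 = mf then max acc (PySem.Str.len wc.1) else acc) := by
    intro acc wc _
    split_ifs <;> omega
  have h1 : List.foldl (fun acc (wc : String × Int) => if wc.2 = mf ∧ acc < PySem.Str.len wc.1 then PySem.Str.len wc.1 else acc) 0 l
      = List.foldl (fun acc (wc : String × Int) => if wc.2 = mf then max acc (PySem.Str.len wc.1) else acc) 0 l :=
    PySem.List.foldl_congr_mem l _ _ 0 hstep
  have h2 : List.foldl (fun acc (wc : String × Int) => if wc.2 = mf then max acc (PySem.Str.len wc.1) else acc) 0 l
      = List.foldl (fun acc (wc : String × Int) => max acc (PySem.Str.len wc.1)) 0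
          (l.filter (fun wc => decide (wc.2 = mf))) :=
    PySem.List.foldl_ite_eq_foldl_filter (fun wc : String × Int => wc.2 = mf)
      (fun acc (wc : String × Int) => max acc (PySem.Str.len wc.1)) l 0
  set F := l.filter (fun wc : String × Int => decide (wc.2 = mf)) with hF
  have h3 : List.foldl (fun acc (wc : String × Int) => max acc (PySem.Str.len wc.1)) 0 F
      = (F.map (fun wc => PySem.Str.len wc.1)).foldl max 0 := List.foldl_map.symm
  have hmF : PySem.Str.len m.1 ∈ F.map (fun wc => PySem.Str.len wc.1) := by
    refine List.mem_map_of_mem ?_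
    rw [hF, List.mem_filter]
    exact ⟨hmmem, by simp [hm2]⟩
  have hge : PySem.Str.len m.1 ≤ (F.map (fun wc => PySem.Str.len wc.1)).foldl max 0 :=
    (PySem.List.le_foldl_max _ _).2 _ hmF
  have hle : (F.map (fun wc => PySem.Str.len wc.1)).foldl max 0 ≤ PySem.Str.len m.1 := by
    rcases PySem.List.foldl_max_mem (F.map (fun wc => PySem.Str.len wc.1)) 0 with h | h
    · rw [h]; exact pv_len_nonneg _
    · obtain ⟨q, hq, hq2⟩ := List.mem_map.mp h
      rw [hF, List.mem_filter] at hq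
      obtain ⟨hql, hqmf⟩ := hq
      have hq2' : q.2 = mf := by simpa using hqmf
      have := hall q hql
      unfold pvLexLE at this
      simp only [hk1, hk2] at this
      omega
  rw [h1, h2, h3]
  omega

-- pvLmax is the same selection as pvSel on the key components
theorem pv_lmax_eq_sel : pvLmax = pvSel Prod.fst Prod.snd := by
  funext b q
  simp only [pvLmax, pvSel]
  split_ifs <;> simp_all <;> omega

theorem pv_foldl_lmax_mem (l : List (Int × Int)) (b : Int × Int) :
    l.foldl pvLmax b = b ∨ l.foldl pvLmax b ∈ l := by
  rw [pv_lmax_eq_sel]; exact pv_foldl_sel_mem _ _ l b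

theorem pv_foldl_lmax_ub (l : List (Int × Int)) (b : Int × Int) :
    pvPLE b (l.foldl pvLmax b) ∧ ∀ q ∈ l, pvPLE q (l.foldl pvLmax b) := by
  rw [pv_lmax_eq_sel]; exact pv_foldl_sel_max _ _ l b

theorem pv_lmax_absorb (b p q : Int × Int) (h : pvPLE p q) :
    pvLmax (pvLmax b p) q = pvLmax b q := by
  obtain ⟨b1, b2⟩ := b; obtain ⟨p1, p2⟩ := p; obtain ⟨q1, q2⟩ := q
  simp only [pvPLE, pvLexLE] at h
  simp only [pvLmax]
  split_ifs <;> simp_all [Prod.ext_iff] <;> omega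

theorem pv_lmax_rcomm (b x y : Int × Int) :
    pvLmax (pvLmax b x) y = pvLmax (pvLmax b y) x := by
  obtain ⟨b1, b2⟩ := b; obtain ⟨x1, x2⟩ := x; obtain ⟨y1, y2⟩ := y
  simp only [pvLmax]
  split_ifs <;> simp_all [Prod.ext_iff] <;> omega

-- the link between the first-lex-argmax of the items and the lex-max of their keys
theorem pv_bridge (x : String × Int) (t : List (String × Int))
    (hpos : ∀ p ∈ x :: t, 0 < p.2) :
    PySem.Str.len (t.foldl (pvSel (fun kv => kv.2) (fun kv => PySem.Str.len kv.1)) x).1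
      = (((x :: t).map pvKey).foldl pvLmax (0, 0)).2 := by
  set k1 : String × Int → Int := fun kv => kv.2 with hk1
  set k2 : String × Int → Int := fun kv => PySem.Str.len kv.1 with hk2
  set M := t.foldl (pvSel k1 k2) x with hM
  set N := ((x :: t).map pvKey).foldl pvLmax (0, 0) with hN
  have hMmem : M ∈ x :: t := by
    rcases pv_foldl_sel_mem k1 k2 t x with h | h
    · rw [hM, h]; exact List.mem_cons_self
    · exact List.mem_cons_of_mem _ h
  have hMub : ∀ y ∈ x :: t, pvLexLE k1 k2 y M := by
    obtain ⟨h1, h2⟩ := pv_foldl_sel_max k1 k2 t x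
    intro y hy
    rcases List.mem_cons.mp hy with rfl | hy
    · exact h1
    · exact h2 y hy
  have hNub := (pv_foldl_lmax_ub ((x :: t).map pvKey) (0, 0)).2
  have hMN : pvPLE (pvKey M) N := hNub _ (List.mem_map_of_mem hMmem)
  have hMpos : 0 < M.2 := hpos M hMmem
  rcases pv_foldl_lmax_mem ((x :: t).map pvKey) (0, 0) with h0 | hmem
  · exfalso
    rw [← hN] at h0
    rw [h0] at hMN
    simp only [pvPLE, pvLexLE, pvKey] at hMN
    omega
  · obtain ⟨y, hy, hyN⟩ := List.mem_map.mp hmem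
    rw [← hN] at hyN
    have hNy : pvPLE N (pvKey M) := by rw [← hyN]; exact hMub y hy
    simp only [pvPLE, pvLexLE, pvKey] at hMN hNy ⊢
    omega

-- A computes the second component of the lex-max of (0,0) and the (count, length) keys
theorem pv_A_eq (s : String) : highest_frequency s =
    (((PySem.Set.ofList (PySem.Str.split₀ s)).map
        (fun k => (((PySem.Str.split₀ s).count k : Int), PySem.Str.len k))).foldl pvLmax (0, 0)).2 := by
  unfold highest_frequency
  simp only [PySem.Dict.foldl_insert_getD_add_one_eq_counter]
  set words := PySem.Str.split₀ s with hwords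
  have hitems : (PySem.Dict.counter words).items
      = (PySem.Set.ofList words).map (fun k => (k, (words.count k : Int))) :=
    PySem.Dict.items_counter words
  have hcomp : (PySem.Set.ofList words).map (fun k => ((words.count k : Int), PySem.Str.len k))
      = ((PySem.Set.ofList words).map (fun k => (k, (words.count k : Int)))).map pvKey := by
    rw [List.map_map]; rfl
  rw [hcomp, ← hitems]
  cases hL : (PySem.Dict.counter words).items with
  | nil => simp [PySem.Dict.values, hL]
  | cons x t =>
    have hpos : ∀ p ∈ x :: t, 0 < p.2 := by
      intro p hp
      rw [← hL, hitems] at hp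
      obtain ⟨k, hk, rfl⟩ := List.mem_map.mp hp
      rw [PySem.Set.mem_ofList] at hk
      simpa using List.count_pos_iff.mpr hk
    simp only [PySem.Dict.values, hL]
    rw [pv_core x t hpos]
    exact pv_bridge x t hpos

-- one maximal run of equal words, consumed by B's streaming pass
theorem pv_run (w : String) : ∀ (k : Nat) (j : Int) (b : Int × Int),
    (List.replicate k w).foldl pvBstep
        (some w, j, (pvLmax b (j, PySem.Str.len w)).1, (pvLmax b (j, PySem.Str.len w)).2)
      = (some w, j + k, (pvLmax b (j + k, PySem.Str.len w)).1, (pvLmax b (j + k, PySem.Str.len w)).2) := by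
  intro k
  induction k with
  | zero => intro j b; simp
  | succ k ih =>
    intro j b
    rw [List.replicate_succ, List.foldl_cons]
    have hstep : pvBstep (some w, j, (pvLmax b (j, PySem.Str.len w)).1, (pvLmax b (j, PySem.Str.len w)).2) w
        = (some w, j + 1, (pvLmax b (j + 1, PySem.Str.len w)).1, (pvLmax b (j + 1, PySem.Str.len w)).2) := by
      have habs : pvLmax (pvLmax b (j, PySem.Str.len w)) (j + 1, PySem.Str.len w)
          = pvLmax b (j + 1, PySem.Str.len w) :=
        pv_lmax_absorb b _ _ (by simp only [pvPLE, pvLexLE]; omega)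
      simp only [pvBstep, if_true]
      show (if j + 1 > (pvLmax b (j, PySem.Str.len w)).1 ∨
              (j + 1 = (pvLmax b (j, PySem.Str.len w)).1 ∧
                PySem.Str.len w > (pvLmax b (j, PySem.Str.len w)).2)
            then ((some w : Option String), j + 1, j + 1, PySem.Str.len w)
            else (some w, j + 1, (pvLmax b (j, PySem.Str.len w)).1, (pvLmax b (j, PySem.Str.len w)).2))
          = _
      by_cases hc : j + 1 > (pvLmax b (j, PySem.Str.len w)).1 ∨
          (j + 1 = (pvLmax b (j, PySem.Str.len w)).1 ∧
            PySem.Str.len w > (pvLmax b (j, PySem.Str.len w)).2)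
      · rw [if_pos hc]
        have h2 : pvLmax b (j + 1, PySem.Str.len w) = (j + 1, PySem.Str.len w) := by
          rw [← habs]; exact if_pos hc
        rw [h2]
      · rw [if_neg hc]
        have h2 : pvLmax b (j + 1, PySem.Str.len w) = pvLmax b (j, PySem.Str.len w) := by
          rw [← habs]; exact if_neg hc
        rw [h2]
    rw [hstep, ih (j + 1) b]
    have hcast : j + 1 + (k : Int) = j + ((k : Nat) + 1 : Nat) := by push_cast; ring
    rw [hcast]

-- in a (≤)-sorted tail, no later element equals the dropped head value
theorem pv_grouped_split : ∀ (t : List String) (w : String),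
    (w :: t).Pairwise (· ≤ ·) → w ∉ t.dropWhile (· == w) := by
  intro t
  induction t with
  | nil => intro w _; simp
  | cons x t' ih =>
    intro w hpw
    rw [List.pairwise_cons] at hpw
    obtain ⟨hwle, hpx⟩ := hpw
    by_cases hx : x = w
    · subst hx
      rw [List.dropWhile_cons_of_pos (by simp)]
      apply ih
      rw [List.pairwise_cons] at hpx ⊢
      exact ⟨fun y hy => le_trans (hwle x (List.mem_cons_self)) (hpx.1 y hy), hpx.2⟩
    · rw [List.dropWhile_cons_of_neg (by simp [hx])]
      intro hmem
      rcases List.mem_cons.mp hmem with h | h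
      · exact hx h.symm
      · rw [List.pairwise_cons] at hpx
        have h1 : w ≤ x := hwle x List.mem_cons_self
        have h2 : x ≤ w := hpx.1 w h
        exact hx (le_antisymm h2 h1)

-- B's streaming pass over a sorted list computes the lex-max of the per-word (count, length) keys
theorem pv_bfold_group : ∀ (n : Nat) (l : List String), l.length ≤ n → l.Pairwise (· ≤ ·) →
    ∀ (p : Option String) (j : Int) (b : Int × Int), (∀ w', p = some w' → w' ∉ l) →
    ∃ D : List String, D.Nodup ∧ (∀ w, w ∈ D ↔ w ∈ l) ∧
      (l.foldl pvBstep (p, j, b.1, b.2)).2.2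
        = (D.map (fun w => ((l.count w : Int), PySem.Str.len w))).foldl pvLmax b := by
  intro n
  induction n with
  | zero =>
    intro l hlen _ p j b _
    have hnil : l = [] := List.eq_nil_of_length_eq_zero (Nat.le_zero.mp hlen)
    subst hnil
    exact ⟨[], by simp, by simp, rfl⟩
  | succ n ih =>
    intro l hlen hpw p j b hp
    cases l with
    | nil => exact ⟨[], by simp, by simp, rfl⟩
    | cons w t =>
      set k := (t.takeWhile (· == w)).length with hk
      set t₂ := t.dropWhile (· == w) with ht2
      have htk : t.takeWhile (· == w) = List.replicate k w := by
        rw [hk]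
        apply List.eq_replicate_of_mem
        intro x hx
        have hpx := List.mem_takeWhile_imp hx
        exact eq_of_beq hpx
      have hsplit : t = List.replicate k w ++ t₂ := by
        rw [← htk, ht2, List.takeWhile_append_dropWhile]
      have hw2 : w ∉ t₂ := pv_grouped_split t w hpw
      have hpwt : t.Pairwise (· ≤ ·) := (List.pairwise_cons.mp hpw).2
      have hpwt2 : t₂.Pairwise (· ≤ ·) := hpwt.sublist (List.dropWhile_sublist _)
      have hpne : ¬ p = some w := by
        intro h
        exact hp w h List.mem_cons_self
      set L := PySem.Str.len w with hL
      have hstep1 : pvBstep (p, j, b.1, b.2) w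
          = (some w, 1, (pvLmax b (1, L)).1, (pvLmax b (1, L)).2) := by
        simp only [pvBstep, if_neg hpne]
        show (if (1 : Int) > b.1 ∨ ((1 : Int) = b.1 ∧ L > b.2)
              then ((some w : Option String), 1, 1, L)
              else (some w, 1, b.1, b.2)) = _
        by_cases hc : (1 : Int) > b.1 ∨ ((1 : Int) = b.1 ∧ L > b.2)
        · rw [if_pos hc]
          have h2 : pvLmax b (1, L) = (1, L) := if_pos hc
          rw [h2]
        · rw [if_neg hc]
          have h2 : pvLmax b (1, L) = b := if_neg hc
          rw [h2]
      have hrun := pv_run w k 1 b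
      have hlen2 : t₂.length ≤ n := by
        have h2 : t.length = k + t₂.length := by
          rw [hsplit, List.length_append, List.length_replicate]
        simp only [List.length_cons] at hlen
        omega
      set m := pvLmax b (1 + (k : Int), L) with hm
      obtain ⟨D₂, hD2nd, hD2mem, hD2eq⟩ := ih t₂ hlen2 hpwt2 (some w) (1 + (k : Int)) m
        (by intro w' hw'; injection hw' with h; rw [← h]; exact hw2)
      have hcountw : (w :: t).count w = 1 + k := by
        rw [hsplit]
        simp [List.count_append, List.count_eq_zero.mpr hw2]
        omega
      have hcount2 : ∀ w' ∈ t₂, w' ≠ w → (w :: t).count w' = t₂.count w' := by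
        intro w' _ hne
        rw [hsplit]
        simp [List.count_append, List.count_replicate, Ne.symm hne]
      refine ⟨w :: D₂, ?_, ?_, ?_⟩
      · rw [List.nodup_cons]
        exact ⟨fun h => hw2 ((hD2mem w).mp h), hD2nd⟩
      · intro w'
        rw [List.mem_cons, List.mem_cons, hD2mem w', hsplit, List.mem_append,
          List.mem_replicate]
        constructor
        · rintro (rfl | h)
          · exact Or.inl rfl
          · exact Or.inr (Or.inr h)
        · rintro (rfl | ⟨_, rfl⟩ | h)
          · exact Or.inl rfl
          · exact Or.inl rfl
          · exact Or.inr h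
      · rw [List.foldl_cons, hstep1, hsplit, List.foldl_append, hrun, hD2eq, ← hsplit]
        rw [List.map_cons, List.foldl_cons]
        have hkeyw : ((((w :: t).count w : Nat) : Int), L) = ((1 : Int) + (k : Int), L) := by
          rw [hcountw]; push_cast; ring_nf
        rw [hkeyw, ← hm]
        congr 1
        apply List.map_congr_left
        intro w' hw'
        have hmem2 : w' ∈ t₂ := (hD2mem w').mp hw'
        have hne : w' ≠ w := fun h => hw2 (h ▸ hmem2)
        rw [hcount2 w' hmem2 hne]

-- ===== VERDICT (by name: the statement is the Claim_ definition above) =====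
theorem highest_frequency_spec : Claim_equal_highest_frequency := by
  intro s _
  unfold Spec_highest_frequency
  rw [pv_A_eq]
  unfold highest_frequency_alt
  set words := PySem.Str.split₀ s with hwords
  set sw := PySem.List.sorted words (fun w => w) false with hsw
  have hperm : sw.Perm words := PySem.List.sorted_perm words (fun w => w) false
  have hpw : sw.Pairwise (· ≤ ·) := PySem.List.sorted_pairwise words (fun w => w)
  obtain ⟨D, hDnd, hDmem, hDeq⟩ := pv_bfold_group sw.length sw le_rfl hpw none 0 ((0 : Int), (0 : Int))
    (by intro w' h; simp at h)
  have hB : (sw.foldl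
      (fun (s : Option String × Int × Int × Int) (w : String) =>
        match (if s.1 = some w then (s.1, s.2.1 + 1) else (some w, (1 : Int))) with
        | (prev, run) =>
          if run > s.2.2.1 ∨ (run = s.2.2.1 ∧ PySem.Str.len w > s.2.2.2)
          then (prev, run, run, PySem.Str.len w)
          else (prev, run, s.2.2.1, s.2.2.2))
      (none, 0, 0, 0)).2.2.2
      = ((D.map (fun w => ((sw.count w : Int), PySem.Str.len w))).foldl pvLmax ((0 : Int), (0 : Int))).2 := by
    rw [← hDeq]; rfl
  rw [hB]
  have hkeys : D.map (fun w => ((sw.count w : Int), PySem.Str.len w))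
      = D.map (fun w => ((words.count w : Int), PySem.Str.len w)) := by
    apply List.map_congr_left
    intro w _
    rw [hperm.count_eq w]
  rw [hkeys]
  have hP : D.Perm (PySem.Set.ofList words) := by
    refine (List.perm_ext_iff_of_nodup hDnd (PySem.Set.nodup_ofList words)).mpr ?_
    intro a
    rw [hDmem a, PySem.List.mem_sorted, PySem.Set.mem_ofList]
  have hfold := @List.Perm.foldl_eq _ _ pvLmax _ _ ⟨fun b x y => pv_lmax_rcomm b x y⟩
    (hP.map (fun w => ((words.count w : Int), PySem.Str.len w))) ((0 : Int), (0 : Int))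
  rw [hfold]
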